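-- pv_equiv track=rewrite | github.com/peterhadda/ai_movie_creation | src/features.py | select_target_column
-- ===== SOURCE A (Python) =====
-- from typing import Any
--
-- def select_target_column(records: list[dict[str, Any]], target_column: str) -> list[Any]:
--     missing_target_rows = [
--         index for index, record in enumerate(records) if record.get(target_column) is None
--     ]
--     if missing_target_rows:
--         raise ValueError(
--             f"Target column '{target_column}' is missing for rows: {missing_target_rows}"
--         )
--     return [record[target_column] for record in records]
-- ===== SOURCE B (Python) =====
-- def select_target_column(records: list, target_column: str) -> list:
--     result = []
--     missing = []
--     for index, record in enumerate(records):
--         value = record.get(target_column)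
--         if value is None:
--             missing.append(index)
--         else:
--             result.append(value)
--     if missing:
--         raise ValueError(
--             f"Target column '{target_column}' is missing for rows: {missing}"
--         )
--     return result
-- ===== Notes on version B (the rewrite author's own statement) =====
-- stated objective: simpler
-- what changed: A makes two passes (a filtering comprehension to find missing rows, then a mapping comprehension to extract values); B makes a single explicit pass over enumerate(records) maintaining two accumulators (values and missing indices) and raises the identical ValueError when the missing list is non-empty.
import Mathlib
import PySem

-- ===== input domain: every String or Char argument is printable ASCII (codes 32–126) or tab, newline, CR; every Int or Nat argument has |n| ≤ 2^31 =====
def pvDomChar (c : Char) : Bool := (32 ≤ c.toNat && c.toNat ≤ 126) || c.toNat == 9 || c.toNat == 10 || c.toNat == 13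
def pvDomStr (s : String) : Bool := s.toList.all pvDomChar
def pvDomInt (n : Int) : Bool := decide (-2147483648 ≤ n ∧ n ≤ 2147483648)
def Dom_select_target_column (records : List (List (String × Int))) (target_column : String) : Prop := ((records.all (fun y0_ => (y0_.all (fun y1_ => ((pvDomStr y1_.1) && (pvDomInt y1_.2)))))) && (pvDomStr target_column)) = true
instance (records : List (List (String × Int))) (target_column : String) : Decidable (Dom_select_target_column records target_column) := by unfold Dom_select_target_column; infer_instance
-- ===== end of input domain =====

-- B replaces A's two comprehension passes by one explicit accumulating pass (objective: simpler, one pass).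
-- Equivalence is about the RETURN value on inputs where A returns (Pre_ excludes the ValueError inputs, where B raises the identical error).

-- ===== PORT A =====
-- A: missing_target_rows = [index for index, record in enumerate(records) if record.get(target_column) is None]
--    if missing_target_rows: raise ValueError(...)
--    return [record[target_column] for record in records]
def select_target_column (records : List (List (String × Int))) (target_column : String) : List Int :=
  let missing_target_rows :=
    ((PySem.List.enumerate records).filter
      (fun p => (PySem.Dict.get? ⟨p.2⟩ target_column).isNone)).map (·.1)
  if missing_target_rows ≠ [] then
    []  -- raise ValueError: excluded by Pre_select_target_column
  else
    records.map (fun record => (PySem.Dict.get? ⟨record⟩ target_column).getD 0)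

-- ===== PORT B =====
-- B's single loop over enumerate(records), two accumulators (kept reversed, restored at the end).
def stcLoop (target_column : String) :
    List (Int × List (String × Int)) → List Int → List Int → List Int × List Int
  | [], result, missing => (result.reverse, missing.reverse)
  | (index, record) :: rest, result, missing =>
    match PySem.Dict.get? ⟨record⟩ target_column with
    | none => stcLoop target_column rest result (index :: missing)
    | some value => stcLoop target_column rest (value :: result) missing

def select_target_column_alt (records : List (List (String × Int))) (target_column : String) : List Int :=
  let (result, missing) := stcLoop target_column (PySem.List.enumerate records) [] []
  if missing ≠ [] then
    []  -- raise ValueError: excluded by Pre_select_target_column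
  else
    result

-- ===== PRECONDITION & SPEC =====
-- A raises ValueError exactly when some record lacks target_column; those inputs are excluded (B raises the same error there).
def Pre_select_target_column (records : List (List (String × Int))) (target_column : String) : Prop :=
  ∀ record ∈ records, (PySem.Dict.get? (⟨record⟩ : PySem.Dict String Int) target_column).isSome

instance (records : List (List (String × Int))) (target_column : String) : Decidable (Pre_select_target_column records target_column) := by unfold Pre_select_target_column; infer_instance

def pvWitness_select_target_column : (List (List (String × Int))) × String :=
  ([[("y", 1), ("x", 2)], [("y", 5)]], "y")

def Spec_select_target_column (records : List (List (String × Int))) (target_column : String) (out : List Int) : Prop := out = select_target_column_alt records target_column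
instance (records : List (List (String × Int))) (target_column : String) (out : List Int) : Decidable (Spec_select_target_column records target_column out) := by unfold Spec_select_target_column; infer_instance

-- ===== CLAIM (what is proved, stated in full; the proofs are below) =====
def Claim_equal_select_target_column : Prop := ∀ (records : List (List (String × Int))) (target_column : String), Dom_select_target_column records target_column → Pre_select_target_column records target_column → Spec_select_target_column records target_column (select_target_column records target_column)

-- ===== LEMMAS AND PROOFS =====

-- When every record in the remaining enumerated list has the key, B's loop never touches 'missing'
-- and returns exactly the mapped values appended to the reversed result accumulator.
theorem stcLoop_all_some (target_column : String)
    (l : List (Int × List (String × Int)))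
    (h : ∀ p ∈ l, (PySem.Dict.get? (⟨p.2⟩ : PySem.Dict String Int) target_column).isSome)
    (result missing : List Int) :
    stcLoop target_column l result missing =
      (result.reverse ++ l.map (fun p => (PySem.Dict.get? (⟨p.2⟩ : PySem.Dict String Int) target_column).getD 0),
       missing.reverse) := by
  induction l generalizing result missing with
  | nil => simp [stcLoop]
  | cons p rest ih =>
    obtain ⟨index, record⟩ := p
    have hp := h (index, record) (List.mem_cons_self)
    cases hg : PySem.Dict.get? (⟨record⟩ : PySem.Dict String Int) target_column with
    | none => simp [hg] at hp
    | some v =>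
      have := ih (fun q hq => h q (List.mem_cons_of_mem _ hq)) (v :: result) missing
      simp [stcLoop, hg, this]

theorem mem_snd_enumerate {α : Type} (xs : List α) (s : Int) (p : Int × α)
    (hp : p ∈ PySem.List.enumerate xs s) : p.2 ∈ xs := by
  induction xs generalizing s with
  | nil => simp [PySem.List.enumerate_nil] at hp
  | cons x rest ih =>
    rw [PySem.List.enumerate_cons] at hp
    rcases List.mem_cons.mp hp with h | h
    · subst h; exact List.mem_cons_self
    · exact List.mem_cons_of_mem _ (ih (s + 1) h)

-- Under Pre_, A's missing filter is empty.
theorem filter_missing_nil (records : List (List (String × Int))) (target_column : String)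
    (hpre : Pre_select_target_column records target_column) :
    (PySem.List.enumerate records).filter
      (fun p => (PySem.Dict.get? (⟨p.2⟩ : PySem.Dict String Int) target_column).isNone) = [] := by
  apply List.filter_eq_nil_iff.mpr
  intro p hp
  have := hpre p.2 (mem_snd_enumerate records 0 p hp)
  simp [Option.isNone, Option.isSome] at this ⊢
  cases hg : PySem.Dict.get? (⟨p.2⟩ : PySem.Dict String Int) target_column with
  | none => rw [hg] at this; simp at this
  | some v => simp

-- ===== VERDICT (by name: the statement is the Claim_ definition above) =====
theorem select_target_column_spec : Claim_equal_select_target_column := by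
  intro records target_column _ hpre
  unfold Spec_select_target_column select_target_column select_target_column_alt
  have hmissA := filter_missing_nil records target_column hpre
  have hloop := stcLoop_all_some target_column (PySem.List.enumerate records)
    (fun p hp => hpre p.2 (mem_snd_enumerate records 0 p hp)) [] []
  simp only [hmissA, hloop, List.map_nil, List.reverse_nil, List.nil_append,
    ne_eq, not_true_eq_false, if_false]
  -- A's map over records equals B's map over enumerate's second components
  have := PySem.List.map_snd_enumerate records (0 : Int)
  calc records.map (fun record => (PySem.Dict.get? (⟨record⟩ : PySem.Dict String Int) target_column).getD 0)
      = ((PySem.List.enumerate records 0).map (·.2)).map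
          (fun record => (PySem.Dict.get? (⟨record⟩ : PySem.Dict String Int) target_column).getD 0) := by rw [this]
    _ = (PySem.List.enumerate records 0).map
          (fun p => (PySem.Dict.get? (⟨p.2⟩ : PySem.Dict String Int) target_column).getD 0) := by
          rw [List.map_map]; rfl
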